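-- pv_equiv track=rewrite | github.com/bharathkadur/CodeSignal | The Core/56. HTML End Tag By Start Tag/HTMLEndTagByStartTag.py | solution
-- ===== SOURCE A (Python) =====
-- def solution(startTag):
--     j = ""
--     for i in startTag:
--         if i == " ":
--             break
--         elif i == "<":
--             pass
--         elif i == ">":
--             break
--         else:
--             j += i
--     j = "</" + j + ">"
--     return j
-- ===== SOURCE B (Python) =====
-- def solution(startTag):
--     n = len(startTag)
--     sp = startTag.find(" ")
--     gt = startTag.find(">")
--     cut = min(sp if sp >= 0 else n, gt if gt >= 0 else n)
--     return "</" + "".join(c for c in startTag[:cut] if c != "<") + ">"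
-- ===== Notes on version B (the rewrite author's own statement) =====
-- stated objective: simpler
-- what changed: Replaces the per-character branch/accumulate loop with a compute-cut-then-slice decomposition: take the minimum of the first-space and first-closing-bracket positions from str.find (defaulting to the length), slice up to it, and filter out the opening brackets.
import Mathlib
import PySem

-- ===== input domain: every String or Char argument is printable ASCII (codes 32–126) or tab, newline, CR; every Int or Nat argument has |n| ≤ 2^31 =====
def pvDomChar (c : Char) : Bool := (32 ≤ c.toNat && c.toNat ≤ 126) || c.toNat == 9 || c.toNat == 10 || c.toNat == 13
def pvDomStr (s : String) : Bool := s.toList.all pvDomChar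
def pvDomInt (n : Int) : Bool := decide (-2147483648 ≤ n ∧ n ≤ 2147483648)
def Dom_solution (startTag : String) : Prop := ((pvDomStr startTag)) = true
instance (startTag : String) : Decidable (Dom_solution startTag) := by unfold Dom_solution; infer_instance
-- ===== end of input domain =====

-- B is simpler: it computes the cut (min of the first ' ' and first '>' positions, default len)
-- and slices, instead of A's per-character break/skip/accumulate loop. Equivalent on all inputs.

-- ===== PORT A =====
-- A's loop: j accumulates characters; ' ' and '>' break, '<' is skipped.
def aLoop (j : List Char) : List Char → List Char
  | [] => j
  | c :: rest =>
    if c = ' ' then j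
    else if c = '<' then aLoop j rest
    else if c = '>' then j
    else aLoop (j ++ [c]) rest

def solution (startTag : String) : String :=
  String.ofList ("</".toList ++ aLoop [] startTag.toList ++ ">".toList)

-- ===== PORT B =====
def solution_alt (startTag : String) : String :=
  let s := startTag.toList
  let n : Int := s.length
  let sp := PySem.Chars.find s [' ']
  let gt := PySem.Chars.find s ['>']
  let cut := min (if sp ≥ 0 then sp else n) (if gt ≥ 0 then gt else n)
  String.ofList ("</".toList ++ (PySem.List.slice s none (some cut)).filter (fun c => c ≠ '<') ++ ">".toList)

-- ===== PRECONDITION & SPEC =====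
def Spec_solution (startTag : String) (out : String) : Prop := out = solution_alt startTag
instance (startTag : String) (out : String) : Decidable (Spec_solution startTag out) := by unfold Spec_solution; infer_instance

-- ===== CLAIM (what is proved, stated in full; the proofs are below) =====
def Claim_equal_solution : Prop := ∀ (startTag : String), Dom_solution startTag → Spec_solution startTag (solution startTag)

-- ===== LEMMAS AND PROOFS =====

-- the "first position of c, defaulting to the length" that B computes
def ffind (s : List Char) (c : Char) : Int :=
  if PySem.Chars.find s [c] ≥ 0 then PySem.Chars.find s [c] else (s.length : Int)

lemma singleton_prefix_iff (c : Char) (l : List Char) : [c] <+: l ↔ l.head? = some c := by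
  constructor
  · rintro ⟨t, rfl⟩; rfl
  · intro h; cases l with
    | nil => simp at h
    | cons a t => simp at h; subst h; exact ⟨t, rfl⟩

lemma singleton_infix_iff (c : Char) (l : List Char) : [c] <:+: l ↔ c ∈ l := by
  constructor
  · rintro ⟨u, v, rfl⟩; simp
  · intro h; obtain ⟨u, v, rfl⟩ := List.append_of_mem h; exact ⟨u, v, by simp⟩

lemma ffind_facts (s : List Char) (c : Char) :
    0 ≤ ffind s c ∧ ffind s c ≤ (s.length : Int) ∧
      (∀ i : Nat, (i : Int) < ffind s c → s[i]? ≠ some c) ∧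
      (ffind s c < (s.length : Int) → s[(ffind s c).toNat]? = some c) := by
  by_cases h : PySem.Chars.find s [c] ≥ 0
  · have hf : ffind s c = PySem.Chars.find s [c] := by simp [ffind, h]
    obtain ⟨hpre, hmin⟩ := PySem.Chars.find_spec (s := s) (sub := [c]) h
    have hle := PySem.Chars.find_le_length s [c]
    rw [singleton_prefix_iff, List.head?_drop] at hpre
    refine ⟨by omega, by omega, ?_, fun _ => by rw [hf]; exact hpre⟩
    intro i hi hcontra
    exact hmin i (by omega) (by rw [singleton_prefix_iff, List.head?_drop]; exact hcontra)
  · have h1 := PySem.Chars.neg_one_le_find s [c]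
    have heq : PySem.Chars.find s [c] = -1 := by omega
    have hnmem : c ∉ s := by
      rw [PySem.Chars.find_eq_neg_one_iff, singleton_infix_iff] at heq; exact heq
    have hf : ffind s c = (s.length : Int) := by simp [ffind, h]
    refine ⟨by omega, by omega, ?_, by omega⟩
    intro i hi hcontra
    exact hnmem (by
      have : i < s.length := by omega
      have := List.getElem?_eq_getElem (l := s) this
      rw [this] at hcontra
      simp at hcontra
      rw [← hcontra]
      exact s.getElem_mem _)

lemma aLoop_eq (cs : List Char) : ∀ (j : List Char),
    aLoop j cs = j ++ (cs.takeWhile (fun c => !(c == ' ' || c == '>'))).filter (fun c => c ≠ '<') := by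
  induction cs with
  | nil => intro j; simp [aLoop]
  | cons c rest ih =>
    intro j
    by_cases h1 : c = ' '
    · simp [aLoop, h1]
    · by_cases h2 : c = '<'
      · simp [aLoop, h2, ih]
      · by_cases h3 : c = '>'
        · simp [aLoop, h3]
        · simp [aLoop, h1, h2, h3, ih]

lemma take_eq_takeWhile (p : Char → Bool) : ∀ (cs : List Char) (m : Nat),
    m ≤ cs.length → (∀ i, (h : i < m) → (h' : i < cs.length) → p (cs[i]'h') = true) →
    (∀ h : m < cs.length, p (cs[m]'h) = false) →
    cs.take m = cs.takeWhile p := by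
  intro cs
  induction cs with
  | nil => intro m _ _ _; simp
  | cons c rest ih =>
    intro m hm hall hstop
    cases m with
    | zero =>
      have := hstop (by simp)
      simp only [List.getElem_cons_zero] at this
      simp [List.takeWhile, this]
    | succ k =>
      have hc : p c = true := hall 0 (by omega) (by simp)
      simp only [List.take, List.takeWhile, hc]
      congr 1
      exact ih k (by simpa using hm) (fun i h h' => hall (i + 1) (by omega) (by simpa using h'))
        (fun h => hstop (by simpa using h))

lemma key (s : List Char) :
    aLoop [] s =
      (PySem.List.slice s none (some (min (ffind s ' ') (ffind s '>')))).filter (fun c => c ≠ '<') := by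
  obtain ⟨hsp0, hspLen, hspAll, hspAt⟩ := ffind_facts s ' '
  obtain ⟨hgt0, hgtLen, hgtAll, hgtAt⟩ := ffind_facts s '>'
  have hcut0 : 0 ≤ min (ffind s ' ') (ffind s '>') := le_min hsp0 hgt0
  rw [PySem.List.slice_to s hcut0, aLoop_eq]
  simp only [List.nil_append]
  congr 1
  symm
  apply take_eq_takeWhile
  · omega
  · intro i h hilen
    have hi : (i : Int) < min (ffind s ' ') (ffind s '>') := by omega
    have h1 := hspAll i (lt_of_lt_of_le hi (min_le_left _ _))
    have h2 := hgtAll i (lt_of_lt_of_le hi (min_le_right _ _))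
    rw [List.getElem?_eq_getElem hilen] at h1 h2
    simp only [ne_eq, Option.some_inj] at h1 h2
    simp [h1, h2]
  · intro h
    have hm : ((min (ffind s ' ') (ffind s '>')).toNat : Int) = min (ffind s ' ') (ffind s '>') := by omega
    rcases le_total (ffind s ' ') (ffind s '>') with hle | hle
    · have hmin : min (ffind s ' ') (ffind s '>') = ffind s ' ' := min_eq_left hle
      have hx := hspAt (by omega)
      have heq : (min (ffind s ' ') (ffind s '>')).toNat = (ffind s ' ').toNat := by omega
      rw [List.getElem?_eq_getElem (by omega)] at hx
      simp only [Option.some_inj] at hx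
      simp [heq, hx]
    · have hmin : min (ffind s ' ') (ffind s '>') = ffind s '>' := min_eq_right hle
      have hx := hgtAt (by omega)
      have heq : (min (ffind s ' ') (ffind s '>')).toNat = (ffind s '>').toNat := by omega
      rw [List.getElem?_eq_getElem (by omega)] at hx
      simp only [Option.some_inj] at hx
      simp [heq, hx]

-- ===== VERDICT (by name: the statement is the Claim_ definition above) =====
theorem solution_spec : Claim_equal_solution := by
  intro startTag _
  unfold Spec_solution solution solution_alt
  congr 1
  congr 1
  congr 1
  exact key startTag.toList
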